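-- pv_equiv track=rewrite | github.com/FireBarret/Bioinformatics-1-2-TUS | kadai-13/justsomefun.py | create_cube_list
-- ===== SOURCE A (Python) =====
-- def create_cube_list(max_value):
--     A = []
--     for i in range(1, 200000):
--         A.append(i**3)
--         if A[i-1] > max_value:
--             A.pop()
--             break
--     return A
-- ===== SOURCE B (Python) =====
-- def create_cube_list(max_value):
--     lo, hi = 0, 199999
--     while lo < hi:
--         mid = (lo + hi + 1) // 2
--         if mid ** 3 <= max_value:
--             lo = mid
--         else:
--             hi = mid - 1
--     return [i ** 3 for i in range(1, lo + 1)]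
-- ===== Notes on version B (the rewrite author's own statement) =====
-- stated objective: alternative
-- what changed: Replaced A's linear append-and-pop scan with a binary search for the largest integer whose cube does not exceed max_value, followed by a direct list comprehension.
import Mathlib
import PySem

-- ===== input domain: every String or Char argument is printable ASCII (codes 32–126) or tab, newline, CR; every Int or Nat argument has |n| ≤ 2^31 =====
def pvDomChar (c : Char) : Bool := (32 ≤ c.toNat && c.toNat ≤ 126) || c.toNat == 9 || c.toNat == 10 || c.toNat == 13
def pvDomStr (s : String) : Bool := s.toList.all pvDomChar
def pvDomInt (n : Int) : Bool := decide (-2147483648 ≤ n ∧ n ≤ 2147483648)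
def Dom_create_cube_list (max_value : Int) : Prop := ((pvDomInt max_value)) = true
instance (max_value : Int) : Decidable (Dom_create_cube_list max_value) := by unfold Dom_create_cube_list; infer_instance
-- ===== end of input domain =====

-- B replaces A's linear append-and-break scan by a binary search for the largest i with
-- i**3 <= max_value followed by a direct list comprehension (alternative decomposition).

-- ===== PORT A =====
-- A's for-loop with break: append i**3; if the just-appended element A[i-1] (= i**3)
-- exceeds max_value, pop it (restoring acc) and break.
def pvLoopA (m : Int) : List Int → List Int → List Int
  | [], acc => acc
  | i :: rest, acc =>
    if i ^ 3 > m then acc           -- append then pop of the same element = acc, then break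
    else pvLoopA m rest (acc ++ [i ^ 3])

def create_cube_list (max_value : Int) : List Int :=
  pvLoopA max_value (PySem.List.pyRange 1 200000 1) []

-- ===== PORT B =====
-- while lo < hi: mid = (lo+hi+1)//2; lo, hi stay nonnegative, so Nat division = Python //.
def pvBsearch (m : Int) (lo hi : Nat) : Nat :=
  if _h : lo < hi then
    let mid := (lo + hi + 1) / 2
    if (mid : Int) ^ 3 ≤ m then pvBsearch m mid hi else pvBsearch m lo (mid - 1)
  else lo
termination_by hi - lo
decreasing_by all_goals omega

def create_cube_list_alt (max_value : Int) : List Int :=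
  let lo := pvBsearch max_value 0 199999
  (PySem.List.pyRange 1 ((lo : Int) + 1) 1).map (fun i => i ^ 3)

-- ===== PRECONDITION & SPEC =====
def Spec_create_cube_list (max_value : Int) (out : List Int) : Prop := out = create_cube_list_alt max_value
instance (max_value : Int) (out : List Int) : Decidable (Spec_create_cube_list max_value out) := by unfold Spec_create_cube_list; infer_instance

-- ===== CLAIM (what is proved, stated in full; the proofs are below) =====
def Claim_equal_create_cube_list : Prop := ∀ (max_value : Int), Dom_create_cube_list max_value → Spec_create_cube_list max_value (create_cube_list max_value)

-- ===== LEMMAS AND PROOFS =====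

lemma pvLoopA_eq (m : Int) :
    ∀ (l acc : List Int),
      pvLoopA m l acc = acc ++ (l.takeWhile (fun i => decide (i ^ 3 ≤ m))).map (fun i => i ^ 3) := by
  intro l
  induction l with
  | nil => intro acc; simp [pvLoopA]
  | cons i rest ih =>
    intro acc
    by_cases h : i ^ 3 > m
    · simp [pvLoopA, h, show ¬ (i ^ 3 ≤ m) by omega]
    · simp only [pvLoopA, if_neg (by omega : ¬ i ^ 3 > m), ih,
        List.takeWhile_cons, decide_eq_true (by omega : i ^ 3 ≤ m)]
      simp

lemma pvCubeMono {a b : Int} (ha : 0 ≤ a) (hab : a ≤ b) : a ^ 3 ≤ b ^ 3 := by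
  have hb : 0 ≤ b := le_trans ha hab
  nlinarith [sq_nonneg a, sq_nonneg b, mul_nonneg ha hb]

lemma pvBsearch_spec (m : Int) (lo hi : Nat) (hle : lo ≤ hi) :
    lo ≤ pvBsearch m lo hi ∧ pvBsearch m lo hi ≤ hi ∧
      (pvBsearch m lo hi ≠ lo → ((pvBsearch m lo hi : Int)) ^ 3 ≤ m) ∧
      ∀ j : Nat, pvBsearch m lo hi < j → j ≤ hi → ¬ ((j : Int) ^ 3 ≤ m) := by
  fun_induction pvBsearch m lo hi with
  | case1 lo hi h mid hq ih =>
    have hmide : mid = (lo + hi + 1) / 2 := rfl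
    have hmid : lo < mid ∧ mid ≤ hi := by omega
    obtain ⟨h1, h2, h3, h4⟩ := ih hmid.2
    refine ⟨by omega, h2, ?_, h4⟩
    intro _
    by_cases hr : pvBsearch m mid hi = mid
    · rw [hr]; exact hq
    · exact h3 hr
  | case2 lo hi h mid hq ih =>
    have hmide : mid = (lo + hi + 1) / 2 := rfl
    have hmid : lo < mid ∧ mid ≤ hi := by omega
    obtain ⟨h1, h2, h3, h4⟩ := ih (by omega)
    refine ⟨h1, by omega, h3, ?_⟩
    intro j hj1 hj2
    by_cases hjm : j ≤ mid - 1
    · exact h4 j hj1 hjm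
    · intro hcube
      exact hq (le_trans (pvCubeMono (by positivity)
        (by exact_mod_cast (by omega : mid ≤ j))) hcube)
  | case3 lo hi h =>
    exact ⟨le_refl _, hle, fun hc => absurd rfl hc, fun j hj1 hj2 => by omega⟩

lemma pvTakeWhile_pyRange (p : Int → Bool) (r b : Int) :
    ∀ (k : Nat) (a : Int), (b - a).toNat ≤ k →
      (∀ j : Int, a ≤ j → j < b → (p j = true ↔ j ≤ r)) →
      (PySem.List.pyRange a b 1).takeWhile p = PySem.List.pyRange a (min b (r + 1)) 1 := by
  intro k
  induction k with
  | zero =>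
    intro a hk hp
    have hba : b ≤ a := by omega
    rw [PySem.List.pyRange_one_eq_nil hba, PySem.List.pyRange_one_eq_nil (by omega : min b (r+1) ≤ a)]
    rfl
  | succ k ih =>
    intro a hk hp
    by_cases hba : b ≤ a
    · rw [PySem.List.pyRange_one_eq_nil hba, PySem.List.pyRange_one_eq_nil (by omega : min b (r+1) ≤ a)]
      rfl
    · have hab : a < b := by omega
      rw [PySem.List.pyRange_one_cons hab, List.takeWhile_cons]
      by_cases hpa : p a = true
      · have har : a ≤ r := (hp a le_rfl hab).mp hpa
        rw [PySem.List.pyRange_one_cons (by omega : a < min b (r+1))]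
        simp only [hpa, if_true]
        exact congrArg (List.cons a) (ih (a + 1) (by omega) (fun j hj1 hj2 => hp j (by omega) hj2))
      · have har : ¬ a ≤ r := fun hle => hpa ((hp a le_rfl hab).mpr hle)
        simp only [hpa]
        rw [PySem.List.pyRange_one_eq_nil (by omega : min b (r+1) ≤ a)]
        simp

-- ===== VERDICT (by name: the statement is the Claim_ definition above) =====
theorem create_cube_list_spec : Claim_equal_create_cube_list := by
  intro m _
  unfold Spec_create_cube_list create_cube_list create_cube_list_alt
  rw [pvLoopA_eq]
  obtain ⟨h1, h2, h3, h4⟩ := pvBsearch_spec m 0 199999 (by omega)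
  set n := pvBsearch m 0 199999 with hn
  have hiff : ∀ j : Int, 1 ≤ j → j < 200000 →
      ((fun i => decide (i ^ 3 ≤ m)) j = true ↔ j ≤ (n : Int)) := by
    intro j hj1 hj2
    simp only [decide_eq_true_eq]
    constructor
    · intro hcube
      by_contra hgt
      have hjn : n < j.toNat := by omega
      have := h4 j.toNat hjn (by omega)
      rw [Int.toNat_of_nonneg (by omega)] at this
      exact this hcube
    · intro hjn
      have hn1 : n ≠ 0 := by omega
      have hq : ((n : Int)) ^ 3 ≤ m := h3 (by omega)
      exact le_trans (pvCubeMono (by omega) hjn) hq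
  rw [pvTakeWhile_pyRange (fun i => decide (i ^ 3 ≤ m)) (n : Int) 200000 200000 1 (by omega) hiff]
  have : min (200000 : Int) ((n : Int) + 1) = (n : Int) + 1 := by omega
  rw [this]
  simp
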